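-- pv_equiv track=rewrite | github.com/DiegoBarrosA/linkedin-resume-generator | privacy_safe_processor.py | categorize_certification
-- ===== SOURCE A (Python) =====
-- def categorize_certification(cert_name: str) -> str:
--     """Categorize certification without revealing specific cert"""
--     cert_lower = cert_name.lower()
--     if any(word in cert_lower for word in ['aws', 'azure', 'cloud']):
--         return 'cloud_technology'
--     elif any(word in cert_lower for word in ['atlassian', 'jira']):
--         return 'project_management'
--     elif any(word in cert_lower for word in ['itil', 'service']):
--         return 'service_management'
--     else:
--         return 'technical_certification'
-- ===== SOURCE B (Python) =====
-- _KEYWORDS = [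
--     ('aws', 0), ('azure', 0), ('cloud', 0),
--     ('atlassian', 1), ('jira', 1),
--     ('itil', 2), ('service', 2),
-- ]
-- _CATEGORIES = ['cloud_technology', 'project_management',
--                'service_management', 'technical_certification']
--
--
-- def categorize_certification(cert_name: str) -> str:
--     # Single scan over the string positions: at each position record the
--     # best (lowest) priority of any keyword starting there; decode at the end.
--     s = cert_name.lower()
--     best = 3
--     for i in range(len(s)):
--         for kw, prio in _KEYWORDS:
--             if prio < best and s.startswith(kw, i):
--                 best = prio
--     return _CATEGORIES[best]
-- ===== Notes on version B (the rewrite author's own statement) =====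
-- stated objective: alternative
-- what changed: Instead of testing each keyword group for substring containment with early return, B makes one scan over the string positions, maintaining the minimum priority of any keyword that starts at a position (startswith), and decodes that priority to the category at the end.
import Mathlib
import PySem

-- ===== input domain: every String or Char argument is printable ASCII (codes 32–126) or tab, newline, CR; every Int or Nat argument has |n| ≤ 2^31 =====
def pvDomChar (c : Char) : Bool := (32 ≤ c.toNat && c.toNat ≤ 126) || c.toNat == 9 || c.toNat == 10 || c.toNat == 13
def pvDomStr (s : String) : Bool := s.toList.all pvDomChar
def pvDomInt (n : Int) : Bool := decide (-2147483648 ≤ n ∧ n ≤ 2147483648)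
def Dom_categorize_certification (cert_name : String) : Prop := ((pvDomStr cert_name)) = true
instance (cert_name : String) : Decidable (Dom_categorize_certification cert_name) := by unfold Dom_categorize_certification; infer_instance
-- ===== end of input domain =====

-- B replaces A's keyword-containment cascade by a single scan over string positions that
-- keeps the minimum priority of any keyword starting at a position (alternative algorithm, same cost).


-- ===== PORT A =====
def categorize_certification (cert_name : String) : String :=
  let cert_lower := PySem.Str.lower cert_name
  if ["aws", "azure", "cloud"].any (fun word => PySem.Str.isIn word cert_lower) then
    "cloud_technology"
  else if ["atlassian", "jira"].any (fun word => PySem.Str.isIn word cert_lower) then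
    "project_management"
  else if ["itil", "service"].any (fun word => PySem.Str.isIn word cert_lower) then
    "service_management"
  else
    "technical_certification"

-- ===== PORT B =====
def pvKeywords : List (String × Nat) :=
  [("aws", 0), ("azure", 0), ("cloud", 0), ("atlassian", 1), ("jira", 1), ("itil", 2), ("service", 2)]
def pvCategories : List String :=
  ["cloud_technology", "project_management", "service_management", "technical_certification"]

-- Python's s.startswith(kw, i) for 0 ≤ i is ported by hand as a prefix test on the suffix s[i:]
-- (exact: i comes from range(len(s)), so 0 ≤ i). best stays in 0..3, so the final list
-- indexing never goes out of range; List.getD is exact there.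
def categorize_certification_alt (cert_name : String) : String :=
  let s := PySem.Str.lower cert_name
  let best := (PySem.List.pyRange 0 (PySem.Str.len s) 1).foldl
    (fun best i => pvKeywords.foldl
      (fun best kp =>
        if kp.2 < best ∧ PySem.Chars.startswith (s.toList.drop i.toNat) kp.1.toList = true then kp.2
        else best)
      best)
    3
  pvCategories.getD best ""

-- ===== PRECONDITION & SPEC =====
def Spec_categorize_certification (cert_name : String) (out : String) : Prop := out = categorize_certification_alt cert_name
instance (cert_name : String) (out : String) : Decidable (Spec_categorize_certification cert_name out) := by unfold Spec_categorize_certification; infer_instance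

-- ===== CLAIM (what is proved, stated in full; the proofs are below) =====
def Claim_equal_categorize_certification : Prop := ∀ (cert_name : String), Dom_categorize_certification cert_name → Spec_categorize_certification cert_name (categorize_certification cert_name)

-- ===== LEMMAS AND PROOFS =====

-- priority contributed by keyword kp at position i of L (3 = no match)
def pvVal (L : List Char) (i : Int) (kp : String × Nat) : Nat :=
  if PySem.Chars.startswith (L.drop i.toNat) kp.1.toList = true then kp.2 else 3

-- the lowest priority of any keyword starting at position i of L (3 = none)
def pvHit (L : List Char) (i : Int) : Nat := ((pvKeywords.map (pvVal L i)).foldr min 3)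

-- the result of the outer position scan
def pvM (L : List Char) : Nat :=
  (PySem.List.pyRange 0 (L.length : Int) 1).foldl (fun b i => min b (pvHit L i)) 3

lemma pvFoldr_le (l : List Nat) : l.foldr min 3 ≤ 3 := by
  induction l with
  | nil => exact le_refl _
  | cons x xs ih => exact le_trans (min_le_right _ _) ih

lemma pvFoldKw (L : List Char) (i : Int) :
    ∀ (kps : List (String × Nat)) (b : Nat), b ≤ 3 →
      kps.foldl (fun best kp =>
          if kp.2 < best ∧ PySem.Chars.startswith (L.drop i.toNat) kp.1.toList = true then kp.2
          else best) b
        = min b ((kps.map (pvVal L i)).foldr min 3) := by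
  intro kps
  induction kps with
  | nil => intro b hb; simp; omega
  | cons kp kps ih =>
    intro b hb
    have hstep : (if kp.2 < b ∧ PySem.Chars.startswith (L.drop i.toNat) kp.1.toList = true
        then kp.2 else b) ≤ 3 := by split_ifs with h <;> omega
    simp only [List.foldl, List.map, List.foldr]
    rw [ih _ hstep]
    have hrest := pvFoldr_le (kps.map (pvVal L i))
    cases hc : PySem.Chars.startswith (L.drop i.toNat) kp.1.toList <;>
      simp [pvVal, hc] <;> all_goals (first | omega | (split_ifs <;> omega))

lemma pvOuter (L : List Char) :
    ∀ (l : List Int) (b : Nat), b ≤ 3 →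
      l.foldl (fun best i => pvKeywords.foldl
          (fun best kp =>
            if kp.2 < best ∧ PySem.Chars.startswith (L.drop i.toNat) kp.1.toList = true then kp.2
            else best) best) b
        = l.foldl (fun b i => min b (pvHit L i)) b := by
  intro l
  induction l with
  | nil => intro b _; rfl
  | cons x xs ih =>
    intro b hb
    simp only [List.foldl]
    rw [pvFoldKw L x pvKeywords b hb]
    exact ih _ (le_trans (min_le_left _ _) hb)

lemma pvFoldMin_le_init (f : Int → Nat) :
    ∀ (l : List Int) (b : Nat), l.foldl (fun b i => min b (f i)) b ≤ b
  | [], _ => le_refl _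
  | x :: xs, b => le_trans (pvFoldMin_le_init f xs _) (min_le_left _ _)

lemma pvFoldMin_le_of_mem (f : Int → Nat) :
    ∀ (l : List Int) (b : Nat) (i : Int), i ∈ l → l.foldl (fun b i => min b (f i)) b ≤ f i
  | [], _, _, hi => absurd hi (List.not_mem_nil)
  | x :: xs, b, i, hi => by
    rcases List.mem_cons.mp hi with h | h
    · subst h; exact le_trans (pvFoldMin_le_init f xs _) (min_le_right _ _)
    · exact pvFoldMin_le_of_mem f xs _ i h

lemma pvLe_foldMin (f : Int → Nat) :
    ∀ (l : List Int) (b p : Nat), p ≤ b → (∀ i ∈ l, p ≤ f i) →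
      p ≤ l.foldl (fun b i => min b (f i)) b
  | [], _, _, hb, _ => hb
  | x :: xs, b, p, hb, hf =>
    pvLe_foldMin f xs _ p (le_min hb (hf x (List.mem_cons_self)))
      (fun i hi => hf i (List.mem_cons_of_mem _ hi))

lemma pvM_le_of_mem (L : List Char) (i : Int)
    (him : i ∈ PySem.List.pyRange 0 (L.length : Int) 1) : pvM L ≤ pvHit L i := by
  unfold pvM; exact pvFoldMin_le_of_mem _ _ _ i him

lemma pvM_le_init (L : List Char) : pvM L ≤ 3 := by
  unfold pvM; exact pvFoldMin_le_init _ _ _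

lemma pvLe_pvM (L : List Char) (p : Nat) (hp : p ≤ 3)
    (hf : ∀ i ∈ PySem.List.pyRange 0 (L.length : Int) 1, p ≤ pvHit L i) : p ≤ pvM L := by
  unfold pvM; exact pvLe_foldMin _ _ _ _ hp hf

-- a keyword starting anywhere is a substring
lemma pvSw_isIn (L : List Char) (n : Nat) (kw : List Char)
    (h : PySem.Chars.startswith (L.drop n) kw = true) : PySem.Chars.isIn kw L = true :=
  (PySem.Chars.exists_prefix_drop_iff_isIn kw L).mp
    ⟨n, (PySem.Chars.startswith_iff _ _).mp h⟩

lemma pvNotSw (L : List Char) (n : Nat) (kw : List Char)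
    (h : ¬ PySem.Chars.isIn kw L = true) :
    PySem.Chars.startswith (L.drop n) kw = false := by
  cases hsw : PySem.Chars.startswith (L.drop n) kw with
  | false => rfl
  | true => exact absurd (pvSw_isIn L n kw hsw) h

-- a nonempty substring starts at some position inside range(len(L))
lemma pvIsIn_sw (L : List Char) (kw : List Char) (hk : kw ≠ [])
    (h : PySem.Chars.isIn kw L = true) :
    ∃ i ∈ PySem.List.pyRange 0 (L.length : Int) 1,
      PySem.Chars.startswith (L.drop i.toNat) kw = true := by
  obtain ⟨j, hj⟩ := (PySem.Chars.exists_prefix_drop_iff_isIn kw L).mpr h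
  have hjlt : j < L.length := by
    by_contra hge
    rw [List.drop_eq_nil_of_le (by omega)] at hj
    exact hk (List.prefix_nil.mp hj)
  refine ⟨(j : Int), ?_, ?_⟩
  · rw [PySem.List.mem_pyRange_one]; omega
  · simpa [Int.toNat_natCast] using (PySem.Chars.startswith_iff _ _).mpr hj

lemma pvHit_eq_zero (L : List Char) (i : Int)
    (h : PySem.Chars.startswith (L.drop i.toNat) ['a','w','s'] = true ∨
         PySem.Chars.startswith (L.drop i.toNat) ['a','z','u','r','e'] = true ∨
         PySem.Chars.startswith (L.drop i.toNat) ['c','l','o','u','d'] = true) :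
    pvHit L i = 0 := by
  rcases h with h | h | h <;>
    (simp [pvHit, pvKeywords, pvVal, h] <;> all_goals (first | omega | (split_ifs <;> omega)))

lemma pvHit_le_one (L : List Char) (i : Int)
    (h : PySem.Chars.startswith (L.drop i.toNat) ['a','t','l','a','s','s','i','a','n'] = true ∨
         PySem.Chars.startswith (L.drop i.toNat) ['j','i','r','a'] = true) :
    pvHit L i ≤ 1 := by
  rcases h with h | h <;>
    (simp [pvHit, pvKeywords, pvVal, h] <;> all_goals (first | omega | (split_ifs <;> omega)))

lemma pvHit_le_two (L : List Char) (i : Int)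
    (h : PySem.Chars.startswith (L.drop i.toNat) ['i','t','i','l'] = true ∨
         PySem.Chars.startswith (L.drop i.toNat) ['s','e','r','v','i','c','e'] = true) :
    pvHit L i ≤ 2 := by
  rcases h with h | h <;>
    (simp [pvHit, pvKeywords, pvVal, h] <;> all_goals (first | omega | (split_ifs <;> omega)))

lemma pvHit_one_le (L : List Char) (i : Int)
    (h0 : ¬ (PySem.Chars.isIn ['a','w','s'] L = true ∨
             PySem.Chars.isIn ['a','z','u','r','e'] L = true ∨
             PySem.Chars.isIn ['c','l','o','u','d'] L = true)) :
    1 ≤ pvHit L i := by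
  have ha := pvNotSw L i.toNat ['a','w','s'] (fun hc => h0 (Or.inl hc))
  have hz := pvNotSw L i.toNat ['a','z','u','r','e'] (fun hc => h0 (Or.inr (Or.inl hc)))
  have hc := pvNotSw L i.toNat ['c','l','o','u','d'] (fun hc => h0 (Or.inr (Or.inr hc)))
  simp [pvHit, pvKeywords, pvVal, ha, hz, hc]
  all_goals (first | omega | (split_ifs <;> omega))

lemma pvHit_two_le (L : List Char) (i : Int)
    (h0 : ¬ (PySem.Chars.isIn ['a','w','s'] L = true ∨
             PySem.Chars.isIn ['a','z','u','r','e'] L = true ∨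
             PySem.Chars.isIn ['c','l','o','u','d'] L = true))
    (h1 : ¬ (PySem.Chars.isIn ['a','t','l','a','s','s','i','a','n'] L = true ∨
             PySem.Chars.isIn ['j','i','r','a'] L = true)) :
    2 ≤ pvHit L i := by
  have ha := pvNotSw L i.toNat ['a','w','s'] (fun hc => h0 (Or.inl hc))
  have hz := pvNotSw L i.toNat ['a','z','u','r','e'] (fun hc => h0 (Or.inr (Or.inl hc)))
  have hc := pvNotSw L i.toNat ['c','l','o','u','d'] (fun hc => h0 (Or.inr (Or.inr hc)))
  have ht := pvNotSw L i.toNat ['a','t','l','a','s','s','i','a','n'] (fun hc => h1 (Or.inl hc))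
  have hj := pvNotSw L i.toNat ['j','i','r','a'] (fun hc => h1 (Or.inr hc))
  simp [pvHit, pvKeywords, pvVal, ha, hz, hc, ht, hj]
  all_goals (first | omega | (split_ifs <;> omega))

lemma pvHit_three_le (L : List Char) (i : Int)
    (h0 : ¬ (PySem.Chars.isIn ['a','w','s'] L = true ∨
             PySem.Chars.isIn ['a','z','u','r','e'] L = true ∨
             PySem.Chars.isIn ['c','l','o','u','d'] L = true))
    (h1 : ¬ (PySem.Chars.isIn ['a','t','l','a','s','s','i','a','n'] L = true ∨
             PySem.Chars.isIn ['j','i','r','a'] L = true))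
    (h2 : ¬ (PySem.Chars.isIn ['i','t','i','l'] L = true ∨
             PySem.Chars.isIn ['s','e','r','v','i','c','e'] L = true)) :
    3 ≤ pvHit L i := by
  have ha := pvNotSw L i.toNat ['a','w','s'] (fun hc => h0 (Or.inl hc))
  have hz := pvNotSw L i.toNat ['a','z','u','r','e'] (fun hc => h0 (Or.inr (Or.inl hc)))
  have hc := pvNotSw L i.toNat ['c','l','o','u','d'] (fun hc => h0 (Or.inr (Or.inr hc)))
  have ht := pvNotSw L i.toNat ['a','t','l','a','s','s','i','a','n'] (fun hc => h1 (Or.inl hc))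
  have hj := pvNotSw L i.toNat ['j','i','r','a'] (fun hc => h1 (Or.inr hc))
  have hi := pvNotSw L i.toNat ['i','t','i','l'] (fun hc => h2 (Or.inl hc))
  have hs := pvNotSw L i.toNat ['s','e','r','v','i','c','e'] (fun hc => h2 (Or.inr hc))
  simp [pvHit, pvKeywords, pvVal, ha, hz, hc, ht, hj, hi, hs]

-- B's port computes pvCategories[pvM L]
lemma pvAlt_eq (cert_name : String) :
    categorize_certification_alt cert_name
      = pvCategories.getD (pvM (PySem.Str.lower cert_name).toList) "" := by
  show pvCategories.getD
      ((PySem.List.pyRange 0 (PySem.Str.len (PySem.Str.lower cert_name)) 1).foldl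
        (fun best i => pvKeywords.foldl
          (fun best kp =>
            if kp.2 < best ∧ PySem.Chars.startswith
                ((PySem.Str.lower cert_name).toList.drop i.toNat) kp.1.toList = true then kp.2
            else best) best) 3) ""
      = pvCategories.getD (pvM (PySem.Str.lower cert_name).toList) ""
  rw [PySem.Str.len_eq, pvOuter (PySem.Str.lower cert_name).toList _ 3 (le_refl 3)]
  rfl

-- ===== VERDICT (by name: the statement is the Claim_ definition above) =====
theorem categorize_certification_spec : Claim_equal_categorize_certification := by
  intro cert_name _
  unfold Spec_categorize_certification
  rw [pvAlt_eq]
  simp only [categorize_certification, List.any_cons, List.any_nil, Bool.or_false,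
    PySem.Str.isIn_eq, Bool.or_eq_true]
  simp only [show "aws".toList = ['a','w','s'] from rfl,
    show "azure".toList = ['a','z','u','r','e'] from rfl,
    show "cloud".toList = ['c','l','o','u','d'] from rfl,
    show "atlassian".toList = ['a','t','l','a','s','s','i','a','n'] from rfl,
    show "jira".toList = ['j','i','r','a'] from rfl,
    show "itil".toList = ['i','t','i','l'] from rfl,
    show "service".toList = ['s','e','r','v','i','c','e'] from rfl]
  by_cases h0 : PySem.Chars.isIn ['a','w','s'] (PySem.Str.lower cert_name).toList = true ∨
      PySem.Chars.isIn ['a','z','u','r','e'] (PySem.Str.lower cert_name).toList = true ∨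
      PySem.Chars.isIn ['c','l','o','u','d'] (PySem.Str.lower cert_name).toList = true
  · have hM : pvM (PySem.Str.lower cert_name).toList = 0 := by
      have hle : pvM (PySem.Str.lower cert_name).toList ≤ 0 := by
        rcases h0 with h | h | h
        · obtain ⟨i, him, hsw⟩ := pvIsIn_sw _ _ (by decide) h
          exact le_trans (pvM_le_of_mem _ i him) (le_of_eq (pvHit_eq_zero _ i (Or.inl hsw)))
        · obtain ⟨i, him, hsw⟩ := pvIsIn_sw _ _ (by decide) h
          exact le_trans (pvM_le_of_mem _ i him)
            (le_of_eq (pvHit_eq_zero _ i (Or.inr (Or.inl hsw))))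
        · obtain ⟨i, him, hsw⟩ := pvIsIn_sw _ _ (by decide) h
          exact le_trans (pvM_le_of_mem _ i him)
            (le_of_eq (pvHit_eq_zero _ i (Or.inr (Or.inr hsw))))
      omega
    rw [if_pos h0, hM]
    rfl
  · rw [if_neg h0]
    by_cases h1 : PySem.Chars.isIn ['a','t','l','a','s','s','i','a','n'] (PySem.Str.lower cert_name).toList = true ∨
        PySem.Chars.isIn ['j','i','r','a'] (PySem.Str.lower cert_name).toList = true
    · have hM : pvM (PySem.Str.lower cert_name).toList = 1 := by
        have hle : pvM (PySem.Str.lower cert_name).toList ≤ 1 := by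
          rcases h1 with h | h
          · obtain ⟨i, him, hsw⟩ := pvIsIn_sw _ _ (by decide) h
            exact le_trans (pvM_le_of_mem _ i him) (pvHit_le_one _ i (Or.inl hsw))
          · obtain ⟨i, him, hsw⟩ := pvIsIn_sw _ _ (by decide) h
            exact le_trans (pvM_le_of_mem _ i him) (pvHit_le_one _ i (Or.inr hsw))
        have hge : 1 ≤ pvM (PySem.Str.lower cert_name).toList :=
          pvLe_pvM _ 1 (by omega) (fun i _ => pvHit_one_le _ i h0)
        omega
      rw [if_pos h1, hM]
      rfl
    · rw [if_neg h1]
      by_cases h2 : PySem.Chars.isIn ['i','t','i','l'] (PySem.Str.lower cert_name).toList = true ∨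
          PySem.Chars.isIn ['s','e','r','v','i','c','e'] (PySem.Str.lower cert_name).toList = true
      · have hM : pvM (PySem.Str.lower cert_name).toList = 2 := by
          have hle : pvM (PySem.Str.lower cert_name).toList ≤ 2 := by
            rcases h2 with h | h
            · obtain ⟨i, him, hsw⟩ := pvIsIn_sw _ _ (by decide) h
              exact le_trans (pvM_le_of_mem _ i him) (pvHit_le_two _ i (Or.inl hsw))
            · obtain ⟨i, him, hsw⟩ := pvIsIn_sw _ _ (by decide) h
              exact le_trans (pvM_le_of_mem _ i him) (pvHit_le_two _ i (Or.inr hsw))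
          have hge : 2 ≤ pvM (PySem.Str.lower cert_name).toList :=
            pvLe_pvM _ 2 (by omega) (fun i _ => pvHit_two_le _ i h0 h1)
          omega
        rw [if_pos h2, hM]
        rfl
      · rw [if_neg h2]
        have hM : pvM (PySem.Str.lower cert_name).toList = 3 := by
          have hle := pvM_le_init (PySem.Str.lower cert_name).toList
          have hge : 3 ≤ pvM (PySem.Str.lower cert_name).toList :=
            pvLe_pvM _ 3 (by omega) (fun i _ => pvHit_three_le _ i h0 h1 h2)
          omega
        rw [hM]
        rfl
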